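-- pv_equiv track=rewrite | github.com/FairyGina/Baekjoon_GINA | 백준/Silver/16654. Generalized German Quotation/Generalized German Quotation.py | mkans
-- ===== SOURCE A (Python) =====
-- from collections import deque
--
-- def mkip(ip):
--     mk=[]
--     if len(ip)%2!=0: return "Keine Loesung"
--     for i in range(0,len(ip),2):
--         if ip[i]!=ip[i+1]: return "Keine Loesung"
--         mk.append(ip[i])
--     return ''.join(mk)
--
-- def mkans(ip):
--     ip=mkip(ip)
--     if ip[0]=='K': return ip
--
--     dq1=deque()
--     dq2=deque()
--     op=[]
--
--     for c in ip:
--         if c=='<':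
--             if not dq2:
--                 dq1.append(c)
--                 op.append('[')
--             else:
--                 dq2.pop()
--                 op.append(']')
--         else:
--             if not dq1:
--                 dq2.append(c)
--                 op.append('[')
--             else:
--                 dq1.pop()
--                 op.append(']')
--
--     if not dq1 and not dq2: return ''.join(op)
--     else: return "Keine Loesung"
-- ===== SOURCE B (Python) =====
-- def mkip(ip):
--     mk=[]
--     if len(ip)%2!=0: return "Keine Loesung"
--     for i in range(0,len(ip),2):
--         if ip[i]!=ip[i+1]: return "Keine Loesung"
--         mk.append(ip[i])
--     return ''.join(mk)
--
-- def mkans(ip):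
--     ip=mkip(ip)
--     if ip[0]=='K': return ip
--     balance=0
--     op=[]
--     for c in ip:
--         new=balance+(1 if c=='<' else -1)
--         op.append('[' if abs(new)>abs(balance) else ']')
--         balance=new
--     return ''.join(op) if balance==0 else "Keine Loesung"
-- ===== Notes on version B (the rewrite author's own statement) =====
-- stated objective: simpler
-- what changed: Replaces the two deques and four push/pop branches with a single integer balance counter: each char adds +1 ('<') or -1 (other), emitting '[' when |balance| grows and ']' when it shrinks, and succeeds iff the final balance is 0.
import Mathlib
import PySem

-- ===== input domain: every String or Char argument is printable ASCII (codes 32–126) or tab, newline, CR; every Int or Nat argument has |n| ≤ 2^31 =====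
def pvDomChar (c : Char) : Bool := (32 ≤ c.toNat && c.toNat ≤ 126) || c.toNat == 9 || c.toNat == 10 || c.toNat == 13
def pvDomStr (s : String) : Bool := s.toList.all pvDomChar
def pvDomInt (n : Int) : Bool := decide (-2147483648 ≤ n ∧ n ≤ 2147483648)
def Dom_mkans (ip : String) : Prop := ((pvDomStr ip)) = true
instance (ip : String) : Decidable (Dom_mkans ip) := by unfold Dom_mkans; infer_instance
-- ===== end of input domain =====

-- B replaces A's two deques by a single integer balance counter (simpler, same O(n) cost).

-- ===== PORT A =====
-- shared helper mkip (identical in Source A and Source B): halve doubled characters, pair-mismatch or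
-- odd length gives "Keine Loesung"; the range(0,len,2) loop reading ip[i], ip[i+1] is the
-- recursion on two chars at a time.
def mkipGo : List Char → Option (List Char)
  | [] => some []
  | [_] => none
  | a :: b :: rest => if a ≠ b then none else (mkipGo rest).map (a :: ·)

def mkip (ip : List Char) : String :=
  if ip.length % 2 ≠ 0 then "Keine Loesung"
  else match mkipGo ip with
    | none => "Keine Loesung"
    | some mk => String.ofList mk

-- A's loop over the halved string with two deques dq1 ('<'s) and dq2 (others);
-- deque.pop (pop from the right) is dropLast.
def mkansLoopA : List Char → List Char → List Char → List Char → String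
  | [], dq1, dq2, op => if dq1 = [] ∧ dq2 = [] then String.ofList op else "Keine Loesung"
  | c :: rest, dq1, dq2, op =>
    if c = '<' then
      if dq2 = [] then mkansLoopA rest (dq1 ++ [c]) dq2 (op ++ ['['])
      else mkansLoopA rest dq1 dq2.dropLast (op ++ [']'])
    else
      if dq1 = [] then mkansLoopA rest dq1 (dq2 ++ [c]) (op ++ ['['])
      else mkansLoopA rest dq1.dropLast dq2 (op ++ [']'])

-- ip[0]=='K' ported as head? = 'K' (s[0] raises only on "", excluded by Pre_mkans).
def mkans (ip : String) : String :=
  let s := mkip ip.toList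
  if s.toList.head? = some 'K' then s
  else mkansLoopA s.toList [] [] []

-- ===== PORT B =====
def mkansLoopB : List Char → Int → List Char → String
  | [], bal, op => if bal = 0 then String.ofList op else "Keine Loesung"
  | c :: rest, bal, op =>
    let nw := bal + (if c = '<' then 1 else -1)
    mkansLoopB rest nw (op ++ [if bal.natAbs < nw.natAbs then '[' else ']'])

def mkans_alt (ip : String) : String :=
  let s := mkip ip.toList
  if s.toList.head? = some 'K' then s
  else mkansLoopB s.toList 0 []

-- ===== PRECONDITION & SPEC =====
-- Pre_ excludes only the empty string, on which Python's ip[0] raises IndexError (in A and in B).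
def Pre_mkans (ip : String) : Prop := ip ≠ ""
instance (ip : String) : Decidable (Pre_mkans ip) := by unfold Pre_mkans; infer_instance
def pvWitness_mkans : String := "<<>>"

def Spec_mkans (ip : String) (out : String) : Prop := out = mkans_alt ip
instance (ip : String) (out : String) : Decidable (Spec_mkans ip out) := by unfold Spec_mkans; infer_instance

-- ===== CLAIM (what is proved, stated in full; the proofs are below) =====
def Claim_equal_mkans : Prop := ∀ (ip : String), Dom_mkans ip → Pre_mkans ip → Spec_mkans ip (mkans ip)

-- ===== LEMMAS AND PROOFS =====

-- In every reachable state of A's loop at least one deque is empty; under that invariant the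
-- pair (dq1, dq2) is represented exactly by the balance len dq1 - len dq2, and A's branch
-- conditions coincide with B's |balance| comparisons.
theorem loopA_eq_loopB (cs : List Char) : ∀ (dq1 dq2 op : List Char),
    (dq1 = [] ∨ dq2 = []) →
    mkansLoopA cs dq1 dq2 op
      = mkansLoopB cs ((dq1.length : Int) - (dq2.length : Int)) op := by
  induction cs with
  | nil =>
    intro dq1 dq2 op h
    have hiff : (dq1 = [] ∧ dq2 = []) ↔ ((dq1.length : Int) - (dq2.length : Int) = 0) := by
      rcases h with h | h <;> subst h <;>
        simp [List.length_eq_zero_iff]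
    simp only [mkansLoopA, mkansLoopB]
    exact if_congr hiff rfl rfl
  | cons c rest ih =>
    intro dq1 dq2 op h
    by_cases hc : c = '<'
    · subst hc
      by_cases h2 : dq2 = []
      · subst h2
        simp only [mkansLoopA, mkansLoopB, List.length_nil, Nat.cast_zero, sub_zero,
          reduceIte]
        rw [if_pos (show ((dq1.length : Int)).natAbs < ((dq1.length : Int) + 1).natAbs by omega)]
        rw [ih (dq1 ++ ['<']) [] _ (Or.inr rfl)]
        congr 1
        simp
      · have h1 : dq1 = [] := by tauto
        subst h1
        have hlen : 0 < dq2.length := List.length_pos_iff.mpr h2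
        simp only [mkansLoopA, mkansLoopB, List.length_nil, Nat.cast_zero, zero_sub,
          if_neg h2, reduceIte]
        rw [if_neg (show ¬ (-(dq2.length : Int)).natAbs < (-(dq2.length : Int) + 1).natAbs by omega)]
        rw [ih [] dq2.dropLast _ (Or.inl rfl)]
        congr 1
        simp [List.length_dropLast]
        omega
    · by_cases h1 : dq1 = []
      · subst h1
        simp only [mkansLoopA, mkansLoopB, List.length_nil, Nat.cast_zero, zero_sub,
          if_neg hc, reduceIte]
        rw [if_pos (show (-(dq2.length : Int)).natAbs < (-(dq2.length : Int) + -1).natAbs by omega)]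
        rw [ih [] (dq2 ++ [c]) _ (Or.inl rfl)]
        congr 1
        simp
        omega
      · have h2 : dq2 = [] := by tauto
        subst h2
        have hlen : 0 < dq1.length := List.length_pos_iff.mpr h1
        simp only [mkansLoopA, mkansLoopB, List.length_nil, Nat.cast_zero, sub_zero,
          if_neg hc, if_neg h1, reduceIte]
        rw [if_neg (show ¬ ((dq1.length : Int)).natAbs < ((dq1.length : Int) + -1).natAbs by omega)]
        rw [ih dq1.dropLast [] _ (Or.inr rfl)]
        congr 1
        simp [List.length_dropLast]
        omega

-- ===== VERDICT (by name: the statement is the Claim_ definition above) =====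
theorem mkans_spec : Claim_equal_mkans := by
  intro ip _ _
  unfold Spec_mkans mkans mkans_alt
  by_cases hk : (mkip ip.toList).toList.head? = some 'K'
  · simp [hk]
  · simp only [if_neg hk]
    simpa using loopA_eq_loopB (mkip ip.toList).toList [] [] [] (Or.inl rfl)
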